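-- pv_equiv track=rewrite | github.com/chenyangyc/TestRefiner | process_extract_d4j_info.py | to_jave_bytecode_types
-- ===== SOURCE A (Python) =====
-- def to_jave_bytecode_types(c_str: str):
--     # ["B", "C", "D", "F", "I", "J", "Z", "S"]
--     if c_str == "B":
--         return "byte"
--     elif c_str == "C":
--         return "char"
--         # return "character"
--     elif c_str == "D":
--         return "double"
--     elif c_str == "F":
--         return "float"
--     elif c_str == "I":
--         return "int"
--         # return "integer"
--     elif c_str == "J":
--         return "long"
--     elif c_str == "Z":
--         return "boolean"
--     elif c_str == "S":
--         return "short"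
--     elif c_str.startswith("L"):
--         return c_str[1:].replace("/", ".")
--     elif c_str.startswith("["):
--         return to_jave_bytecode_types(c_str[1:]) + "[]"
--     else:
--         raise NotImplementedError("class type %s not implemented yet" % c_str)
-- ===== SOURCE B (Python) =====
-- _PRIMS = {"B": "byte", "C": "char", "D": "double", "F": "float",
--           "I": "int", "J": "long", "Z": "boolean", "S": "short"}
--
-- def to_jave_bytecode_types(c_str: str):
--     dims = 0
--     while dims < len(c_str) and c_str[dims] == '[':
--         dims += 1
--     base = c_str[dims:]
--     if base in _PRIMS:
--         name = _PRIMS[base]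
--     elif base.startswith("L"):
--         name = base[1:].replace("/", ".")
--     else:
--         raise NotImplementedError("class type %s not implemented yet" % base)
--     return name + "[]" * dims
-- ===== Notes on version B (the rewrite author's own statement) =====
-- stated objective: alternative
-- what changed: Replaces the recursion over array nesting by one pass that counts leading '[' and slices them off, and replaces the eight-way elif chain by a dict lookup of the base descriptor; '[]' is appended dims times at the end.
import Mathlib
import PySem

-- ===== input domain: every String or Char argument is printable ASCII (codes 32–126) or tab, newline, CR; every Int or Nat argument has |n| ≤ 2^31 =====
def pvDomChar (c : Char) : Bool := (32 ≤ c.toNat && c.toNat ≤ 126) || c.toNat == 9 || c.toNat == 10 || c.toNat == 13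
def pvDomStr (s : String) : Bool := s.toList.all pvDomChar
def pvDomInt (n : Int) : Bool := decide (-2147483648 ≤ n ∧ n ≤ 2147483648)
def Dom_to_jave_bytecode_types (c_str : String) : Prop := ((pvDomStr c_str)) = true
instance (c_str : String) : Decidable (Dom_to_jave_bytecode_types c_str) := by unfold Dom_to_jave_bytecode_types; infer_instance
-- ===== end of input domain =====

-- B replaces A's recursion over array nesting by counting leading '[' once, a dict lookup for the base, and appending '[]' dims times (objective: alternative decomposition, same cost).
-- ===== PORT A =====
-- literal transliteration of A's recursion; the 'raise' branch returns "" (excluded by Pre_)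
def pvA_core : List Char → String
  | [] => ""
  | c :: rest =>
    if c :: rest = ['B'] then "byte"
    else if c :: rest = ['C'] then "char"
    else if c :: rest = ['D'] then "double"
    else if c :: rest = ['F'] then "float"
    else if c :: rest = ['I'] then "int"
    else if c :: rest = ['J'] then "long"
    else if c :: rest = ['Z'] then "boolean"
    else if c :: rest = ['S'] then "short"
    else if PySem.Chars.startswith (c :: rest) ['L'] then
      String.ofList (PySem.Chars.replace rest ['/'] ['.'])
    else if PySem.Chars.startswith (c :: rest) ['['] then
      pvA_core rest ++ "[]"
    else ""  -- A raises NotImplementedError here; outside Pre_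

def to_jave_bytecode_types (c_str : String) : String := pvA_core c_str.toList

-- ===== PORT B =====
def pvPrims : PySem.Dict String String := PySem.Dict.ofList
  [("B", "byte"), ("C", "char"), ("D", "double"), ("F", "float"),
   ("I", "int"), ("J", "long"), ("Z", "boolean"), ("S", "short")]

def pvB_core (cs : List Char) : String :=
  let dims := (cs.takeWhile (· == '[')).length   -- the while loop counting leading '['
  let base := cs.drop dims
  let name :=
    match PySem.Dict.get? pvPrims (String.ofList base) with
    | some v => v
    | none =>
      if PySem.Chars.startswith base ['L'] then
        String.ofList (PySem.Chars.replace (base.drop 1) ['/'] ['.'])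
      else ""  -- B raises NotImplementedError here; outside Pre_
  name ++ String.join (List.replicate dims "[]")

def to_jave_bytecode_types_alt (c_str : String) : String := pvB_core c_str.toList

-- ===== PRECONDITION & SPEC =====
-- Pre_ excludes exactly the inputs on which A (and B) raise NotImplementedError:
-- those whose descriptor, after stripping leading '[', is neither one of the eight
-- primitive letters nor starts with 'L'.
def Pre_to_jave_bytecode_types (c_str : String) : Prop :=
  let base := c_str.toList.dropWhile (· == '[')
  base ∈ [['B'], ['C'], ['D'], ['F'], ['I'], ['J'], ['Z'], ['S']] ∨ base.head? = some 'L'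
instance (c_str : String) : Decidable (Pre_to_jave_bytecode_types c_str) := by
  unfold Pre_to_jave_bytecode_types; infer_instance
def pvWitness_to_jave_bytecode_types : String := "[Ljava/lang/String;"

def Spec_to_jave_bytecode_types (c_str : String) (out : String) : Prop := out = to_jave_bytecode_types_alt c_str
instance (c_str : String) (out : String) : Decidable (Spec_to_jave_bytecode_types c_str out) := by unfold Spec_to_jave_bytecode_types; infer_instance

-- ===== CLAIM (what is proved, stated in full; the proofs are below) =====
def Claim_equal_to_jave_bytecode_types : Prop := ∀ (c_str : String), Dom_to_jave_bytecode_types c_str → Pre_to_jave_bytecode_types c_str → Spec_to_jave_bytecode_types c_str (to_jave_bytecode_types c_str)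

-- ===== LEMMAS AND PROOFS =====

theorem pv_join_replicate_succ (n : Nat) (s : String) :
    String.join (List.replicate (n + 1) s) = String.join (List.replicate n s) ++ s := by
  rw [List.replicate_succ']
  simp [String.join]

theorem pv_core_eq (cs : List Char)
    (h : cs.dropWhile (· == '[') ∈ [['B'], ['C'], ['D'], ['F'], ['I'], ['J'], ['Z'], ['S']] ∨
         (cs.dropWhile (· == '[')).head? = some 'L') :
    pvA_core cs = pvB_core cs := by
  induction cs with
  | nil => simp at h
  | cons c rest ih =>
    by_cases hc : c = '['
    · subst hc
      have hpre : rest.dropWhile (· == '[') ∈ [['B'], ['C'], ['D'], ['F'], ['I'], ['J'], ['Z'], ['S']] ∨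
          (rest.dropWhile (· == '[')).head? = some 'L' := by
        simpa [List.dropWhile_cons] using h
      have hA : pvA_core ('[' :: rest) = pvA_core rest ++ "[]" := by
        simp [pvA_core, PySem.Chars.startswith_iff, List.cons_prefix_cons]
      have hB : pvB_core ('[' :: rest) = pvB_core rest ++ "[]" := by
        simp [pvB_core, List.drop_succ_cons,
              pv_join_replicate_succ, String.append_assoc]
      rw [hA, hB, ih hpre]
    · have hdw : (c :: rest).dropWhile (· == '[') = c :: rest := by
        simp [hc]
      rw [hdw] at h
      have hB0 : pvB_core (c :: rest) =
          (match PySem.Dict.get? pvPrims (String.ofList (c :: rest)) with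
           | some v => v
           | none =>
             if PySem.Chars.startswith (c :: rest) ['L'] then
               String.ofList (PySem.Chars.replace ((c :: rest).drop 1) ['/'] ['.'])
             else "") := by
        simp [pvB_core, hc, String.join]
      rcases h with h | h
      · fin_cases h <;> decide
      · simp only [List.head?_cons, Option.some.injEq] at h
        subst h
        rw [hB0]
        have hget : PySem.Dict.get? pvPrims (String.ofList ('L' :: rest)) = none := by
          simp [pvPrims, PySem.Dict.get?, PySem.Dict.ofList]
          intro a b hab
          have hit : (PySem.Dict.empty.update
              [("B", "byte"), ("C", "char"), ("D", "double"), ("F", "float"), ("I", "int"),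
               ("J", "long"), ("Z", "boolean"), ("S", "short")] : PySem.Dict String String).items =
              [("B", "byte"), ("C", "char"), ("D", "double"), ("F", "float"), ("I", "int"),
               ("J", "long"), ("Z", "boolean"), ("S", "short")] := by rfl
          rw [hit] at hab
          fin_cases hab <;>
            (intro he; have h2 := congrArg String.toList he; simp at h2)
        rw [hget]
        simp [pvA_core, PySem.Chars.startswith_iff, List.cons_prefix_cons]

-- ===== VERDICT (by name: the statement is the Claim_ definition above) =====
theorem to_jave_bytecode_types_spec : Claim_equal_to_jave_bytecode_types := by
  intro c_str _ hpre
  unfold Spec_to_jave_bytecode_types to_jave_bytecode_types to_jave_bytecode_types_alt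
  exact pv_core_eq c_str.toList hpre
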